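-- pv_equiv track=rewrite | github.com/AntonEryomin/yandex_algo_training | Тренировки по алгоритмам 1.0/Домашнее задание 4/Task I.py | create_dictionary
-- ===== SOURCE A (Python) =====
-- from typing import List, Dict, Set
--
-- def create_dictionary(words: List[str]) -> Dict[str, Set[str]]:
--     dictionary = {}
--     for word in words:
--         if word.lower() in dictionary:
--             dictionary[word.lower()].add(word)
--         else:
--             dictionary[word.lower()] = set([word])
--     return dictionary
-- ===== SOURCE B (Python) =====
-- def create_dictionary(words):
--     # Alternative decomposition: first compute the distinct lowercase keys in
--     # first-occurrence order, then build each group with one set comprehension.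
--     keys = list(dict.fromkeys(w.lower() for w in words))
--     return {k: {w for w in words if w.lower() == k} for k in keys}
-- ===== Notes on version B (the rewrite author's own statement) =====
-- stated objective: alternative
-- what changed: A builds the dict in one pass, branching on key presence and mutating per-key sets; B first computes the distinct lowercase keys in first-occurrence order (dict.fromkeys) and then builds each group directly with a set comprehension over the whole list.
import Mathlib
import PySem

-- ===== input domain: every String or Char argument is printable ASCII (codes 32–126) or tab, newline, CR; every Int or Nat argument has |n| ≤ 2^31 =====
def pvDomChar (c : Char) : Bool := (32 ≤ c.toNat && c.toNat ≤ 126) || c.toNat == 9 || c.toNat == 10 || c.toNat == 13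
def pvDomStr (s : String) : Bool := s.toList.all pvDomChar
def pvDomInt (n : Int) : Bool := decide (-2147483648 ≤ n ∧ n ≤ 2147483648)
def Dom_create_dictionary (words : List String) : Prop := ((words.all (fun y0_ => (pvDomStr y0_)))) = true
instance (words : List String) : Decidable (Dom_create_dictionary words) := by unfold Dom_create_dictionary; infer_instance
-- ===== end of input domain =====

-- B replaces A's one-pass branching dict build by "dedup the lowercase keys, then one set
-- comprehension per key" — an alternative decomposition of the same grouping (not faster).


-- ===== PORT A =====
def create_dictionary (words : List String) : List (String × List String) :=
  (words.foldl (fun d w =>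
      if d.contains (PySem.Str.lower w) then
        d.modify (PySem.Str.lower w) [] (fun s => PySem.Set.add s w)
      else
        d.insert (PySem.Str.lower w) (PySem.Set.ofList [w]))
    (PySem.Dict.empty : PySem.Dict String (List String))).items

-- ===== PORT B =====
def create_dictionary_alt (words : List String) : List (String × List String) :=
  (PySem.List.dedup (words.map (fun w => PySem.Str.lower w))).map
    (fun k => (k, PySem.Set.ofList (words.filter (fun w => PySem.Str.lower w == k))))

-- ===== PRECONDITION & SPEC =====
def Spec_create_dictionary (words : List String) (out : List (String × List String)) : Prop := out = create_dictionary_alt words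
instance (words : List String) (out : List (String × List String)) : Decidable (Spec_create_dictionary words out) := by unfold Spec_create_dictionary; infer_instance

-- ===== CLAIM (what is proved, stated in full; the proofs are below) =====
def Claim_equal_create_dictionary : Prop := ∀ (words : List String), Dom_create_dictionary words → Spec_create_dictionary words (create_dictionary words)

-- ===== LEMMAS AND PROOFS =====

-- A's two branches are both 'd.modify (lower w) [] (Set.add · w)'
theorem cd_step_eq (d : PySem.Dict String (List String)) (w : String) :
    (if d.contains (PySem.Str.lower w) then
        d.modify (PySem.Str.lower w) [] (fun s => PySem.Set.add s w)
      else
        d.insert (PySem.Str.lower w) (PySem.Set.ofList [w]))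
    = d.modify (PySem.Str.lower w) [] (fun s => PySem.Set.add s w) := by
  split
  · rfl
  · rename_i h
    have hg : d.getD (PySem.Str.lower w) [] = [] :=
      PySem.Dict.getD_of_not_contains _ _ (by simpa using h)
    show _ = d.insert _ (PySem.Set.add (d.getD (PySem.Str.lower w) []) w)
    rw [hg]
    rfl

-- lookup through the uniform modify-loop: the group at k is the deduped filter
theorem cd_getD_fold (words : List String) (d : PySem.Dict String (List String)) (k : String) :
    (words.foldl (fun d w => d.modify (PySem.Str.lower w) [] (fun s => PySem.Set.add s w)) d).getD k []
    = PySem.Set.update (d.getD k []) (words.filter (fun w => PySem.Str.lower w == k)) := by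
  induction words generalizing d with
  | nil => rfl
  | cons w ws ih =>
    simp only [List.foldl_cons, List.filter_cons, ih]
    by_cases h : PySem.Str.lower w = k
    · subst h
      simp [PySem.Dict.getD_modify_self, PySem.Set.update]
    · have hne : ¬ k = PySem.Str.lower w := fun e => h e.symm
      simp [PySem.Dict.getD_modify, hne, h]

theorem create_dictionary_eq (words : List String) :
    create_dictionary words = create_dictionary_alt words := by
  unfold create_dictionary
  have h1 : words.foldl (fun d w =>
      if d.contains (PySem.Str.lower w) then
        d.modify (PySem.Str.lower w) [] (fun s => PySem.Set.add s w)
      else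
        d.insert (PySem.Str.lower w) (PySem.Set.ofList [w]))
      (PySem.Dict.empty : PySem.Dict String (List String))
      = words.foldl (fun d w => d.modify (PySem.Str.lower w) [] (fun s => PySem.Set.add s w))
        (PySem.Dict.empty : PySem.Dict String (List String)) :=
    PySem.List.foldl_congr_mem words _ _ _ (fun acc x _ => cd_step_eq acc x)
  rw [h1]
  rw [PySem.Dict.items_eq_map_keys _
      (PySem.Dict.nodup_keys_foldl_modify_key words (fun w => PySem.Str.lower w) []
        (fun d w s => PySem.Set.add s w) PySem.Dict.empty PySem.Dict.nodup_keys_empty) []]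
  rw [PySem.Dict.keys_foldl_modify_key]
  unfold create_dictionary_alt
  have hk : PySem.Set.update (PySem.Dict.empty : PySem.Dict String (List String)).keys
      (words.map (fun w => PySem.Str.lower w))
      = PySem.List.dedup (words.map (fun w => PySem.Str.lower w)) := by
    simp [PySem.List.dedup, PySem.Set.ofList_eq_foldl, PySem.Set.update, PySem.Dict.keys_empty]
  rw [hk]
  refine List.map_congr_left (fun k _ => ?_)
  rw [cd_getD_fold]
  simp [PySem.Dict.getD_empty, PySem.Set.update, PySem.Set.ofList_eq_foldl]

-- ===== VERDICT (by name: the statement is the Claim_ definition above) =====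
theorem create_dictionary_spec : Claim_equal_create_dictionary := by
  intro words _
  exact create_dictionary_eq words
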